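-- pv_equiv track=rewrite | github.com/duckdb/duckdb | scripts/sqllogictest/parser/parser.py | create_formatted_list
-- ===== SOURCE A (Python) =====
-- def create_formatted_list(items) -> str:
--     res = ''
--     for i, option in enumerate(items):
--         if i + 1 == len(items):
--             spacer = ' or '
--         elif i != 0:
--             spacer = ', '
--         else:
--             spacer = ''
--         res += f"{spacer}'{option}'"
--     return res
-- ===== SOURCE B (Python) =====
-- def create_formatted_list(items) -> str:
--     quoted = [f"'{o}'" for o in items]
--     if not quoted:
--         return ''
--     return ', '.join(quoted[:-1]) + ' or ' + quoted[-1]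
-- ===== Notes on version B (the rewrite author's own statement) =====
-- stated objective: simpler
-- what changed: Replaces the per-index spacer branching inside an enumerate loop by quoting all items once and splitting the last element out: join the first n-1 quoted items with ', ' and append ' or ' plus the last.
import Mathlib
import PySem

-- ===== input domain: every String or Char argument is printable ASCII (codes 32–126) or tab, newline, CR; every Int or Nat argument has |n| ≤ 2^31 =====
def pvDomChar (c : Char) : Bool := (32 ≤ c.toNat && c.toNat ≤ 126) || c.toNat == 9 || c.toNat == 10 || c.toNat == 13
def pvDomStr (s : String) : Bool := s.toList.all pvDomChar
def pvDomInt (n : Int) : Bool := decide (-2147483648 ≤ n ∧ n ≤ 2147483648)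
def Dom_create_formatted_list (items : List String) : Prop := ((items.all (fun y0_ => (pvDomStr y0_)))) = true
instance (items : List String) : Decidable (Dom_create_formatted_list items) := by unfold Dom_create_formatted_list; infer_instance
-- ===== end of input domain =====

-- B replaces A's per-index spacer branching inside the loop by quoting every item once and
-- splitting the last quoted item out of a ', '-join (objective: simpler).

-- ===== PORT A =====
-- the 'for i, option in enumerate(items)' loop: i is the loop index, res the accumulator
def pvAFold (n : Int) : Int → String → List String → String
  | _, res, [] => res
  | i, res, option :: rest =>
      let spacer := if i + 1 = n then " or " else if i ≠ 0 then ", " else ""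
      pvAFold n (i + 1) (res ++ spacer ++ "'" ++ option ++ "'") rest

def create_formatted_list (items : List String) : String :=
  pvAFold (items.length : Int) 0 "" items

-- ===== PORT B =====
def create_formatted_list_alt (items : List String) : String :=
  let quoted := items.map (fun o => "'" ++ o ++ "'")
  match quoted with
  | [] => ""   -- 'if not quoted: return ""'
  | _ :: _ =>
      -- quoted[:-1] on a list is dropLast; quoted[-1] on a nonempty list is its last element
      PySem.Str.join ", " quoted.dropLast ++ " or " ++ quoted.getLastD ""

-- ===== PRECONDITION & SPEC =====
def Spec_create_formatted_list (items : List String) (out : String) : Prop := out = create_formatted_list_alt items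
instance (items : List String) (out : String) : Decidable (Spec_create_formatted_list items out) := by unfold Spec_create_formatted_list; infer_instance

-- ===== CLAIM (what is proved, stated in full; the proofs are below) =====
def Claim_equal_create_formatted_list : Prop := ∀ (items : List String), Dom_create_formatted_list items → Spec_create_formatted_list items (create_formatted_list items)

-- ===== LEMMAS AND PROOFS =====

-- the characters contributed by the middle items (everything after the first, before the last)
def pvMids (xs : List String) : List Char :=
  xs.flatMap (fun s => ", ".toList ++ "'".toList ++ s.toList ++ "'".toList)

-- A's loop over the tail 'xs ++ [last]' starting at index i ≥ 1
theorem pvAFold_mid (y : String) : ∀ (xs : List String) (i : Int) (res : String), 1 ≤ i →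
    (pvAFold (i + xs.length + 1) i res (xs ++ [y])).toList =
      res.toList ++ pvMids xs ++ " or ".toList ++ "'".toList ++ y.toList ++ "'".toList := by
  intro xs
  induction xs with
  | nil => intro i res hi; simp [pvAFold, pvMids]
  | cons x xs ih =>
      intro i res hi
      have h1 : ¬(i + 1 = i + ((x :: xs).length : Int) + 1) := by
        push_cast [List.length_cons]; omega
      have h2 : i ≠ 0 := by omega
      have h3 : i + ((x :: xs).length : Int) + 1 = (i + 1) + (xs.length : Int) + 1 := by
        push_cast [List.length_cons]; ring
      rw [List.cons_append]
      simp only [pvAFold, h1, h2, if_false, if_true, ne_eq, not_false_eq_true]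
      rw [h3, ih (i + 1) _ (by omega)]
      simp [pvMids]

-- A's first loop iteration when the list has at least two elements (spacer = '')
theorem pvAFold_first (x : String) (rest : List String) (n : Int) (hn : n ≠ 1) :
    pvAFold n 0 "" (x :: rest) = pvAFold n 1 ("" ++ "" ++ "'" ++ x ++ "'") rest := by
  simp only [pvAFold]
  rw [if_neg (by omega : ¬((0 : Int) + 1 = n)), if_neg (by simp : ¬((0 : Int) ≠ 0))]
  norm_num

-- B's ', '-join of the quoted first and middle items, at the character level
theorem pvJoin_quoted : ∀ (xs : List String) (x : String),
    PySem.Chars.join [',', ' ']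
        (('\'' :: (x.toList ++ ['\''])) :: List.map (String.toList ∘ fun o => "'" ++ o ++ "'") xs) =
      '\'' :: (x.toList ++ '\'' :: pvMids xs) := by
  intro xs
  induction xs with
  | nil => intro x; simp [pvMids, PySem.Chars.join_singleton]
  | cons x' xs ih =>
      intro x
      simp only [List.map_cons, Function.comp_apply]
      have hb : String.toList ("'" ++ x' ++ "'") = '\'' :: (x'.toList ++ ['\'']) := by simp
      rw [PySem.Chars.join_cons_cons, hb, ih x']
      simp [pvMids]

theorem create_formatted_list_spec : Claim_equal_create_formatted_list := by
  unfold Claim_equal_create_formatted_list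
  intro items _
  unfold Spec_create_formatted_list
  cases items with
  | nil => rfl
  | cons x l =>
      rcases l.eq_nil_or_concat with rfl | ⟨xs, y, rfl⟩
      · refine String.toList_inj.mp ?_
        simp [create_formatted_list, create_formatted_list_alt, pvAFold, PySem.Str.join,
          PySem.Chars.join, List.intercalate]
      · simp only [List.concat_eq_append]
        refine String.toList_inj.mp ?_
        have hn1 : (((x :: (xs ++ [y])).length : ℕ) : Int) ≠ 1 := by
          push_cast [List.length_cons, List.length_append, List.length_nil]; omega
        have hn : (((x :: (xs ++ [y])).length : ℕ) : Int) = 1 + (xs.length : Int) + 1 := by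
          push_cast [List.length_cons, List.length_append, List.length_nil]; omega
        have hmap : (x :: (xs ++ [y])).map (fun o => "'" ++ o ++ "'")
            = (("'" ++ x ++ "'") :: xs.map (fun o => "'" ++ o ++ "'")) ++ ["'" ++ y ++ "'"] := by
          simp
        rw [create_formatted_list, pvAFold_first x _ _ hn1, hn,
          pvAFold_mid y xs 1 _ (by norm_num)]
        rw [create_formatted_list_alt]
        simp only [hmap]
        rw [List.dropLast_concat, List.getLastD_concat]
        simp only [PySem.Str.join]
        simp
        rw [pvJoin_quoted xs x]
        simp
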